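-- pv_equiv track=rewrite | github.com/AviNoah/Advent-of-Code | AOC 2023/Day 14/main.py | count_round_rocks_at
-- ===== SOURCE A (Python) =====
-- def count_round_rocks_at(line: list) -> list:
--     # Return a list of the amount of O's between square rocks
--     count_of_O = list()
--
--     count = 0
--     for elem in line:
--         if elem == "#":
--             count_of_O.append(count)
--             count = 0
--         elif elem == "O":
--             count += 1
--     else:
--         count_of_O.append(count)
--
--     return count_of_O
-- ===== SOURCE B (Python) =====
-- def count_round_rocks_at(line: list) -> list:
--     # Divide-and-recurse: locate the first '#', count the 'O's before it with
--     # list.count, and recurse on the remainder after it; a segment with no '#'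
--     # is the base case.
--     if "#" in line:
--         i = line.index("#")
--         return [line[:i].count("O")] + count_round_rocks_at(line[i + 1:])
--     return [line.count("O")]
-- ===== Notes on version B (the rewrite author's own statement) =====
-- stated objective: alternative
-- what changed: B is a recursive divide-and-conquer: it finds the first '#' with list.index, counts the 'O's of that prefix with list.count, and recurses on the suffix, instead of A's single elementwise loop threading an integer accumulator flushed at each '#'.
import Mathlib
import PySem

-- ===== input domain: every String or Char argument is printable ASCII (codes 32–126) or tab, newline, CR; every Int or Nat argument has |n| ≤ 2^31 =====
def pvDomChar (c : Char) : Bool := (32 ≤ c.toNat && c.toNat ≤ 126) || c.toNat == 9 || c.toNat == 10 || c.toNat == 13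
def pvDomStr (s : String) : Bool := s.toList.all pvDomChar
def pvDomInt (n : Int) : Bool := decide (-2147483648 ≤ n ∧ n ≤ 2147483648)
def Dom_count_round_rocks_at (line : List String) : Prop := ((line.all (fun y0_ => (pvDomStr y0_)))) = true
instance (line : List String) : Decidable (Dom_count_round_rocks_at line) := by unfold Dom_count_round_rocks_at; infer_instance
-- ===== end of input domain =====

-- B recursively splits at the first '#' (list.index) and counts each prefix with
-- list.count, instead of A's elementwise loop with an inline integer accumulator
-- (objective: alternative).


-- ===== PORT A =====
-- A: fold a (count_of_O, count) pair over the line; append the final count at the end.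
def count_round_rocks_at (line : List String) : List Int :=
  let st := line.foldl (fun (st : List Int × Int) elem =>
    if elem = "#" then (st.1 ++ [st.2], 0)
    else if elem = "O" then (st.1, st.2 + 1)
    else st) ([], 0)
  st.1 ++ [st.2]

-- ===== PORT B =====
-- B: if "#" in line, take i = line.index("#"), emit line[:i].count("O") and recurse
-- on line[i+1:]; otherwise return [line.count("O")].
def count_round_rocks_at_alt (line : List String) : List Int :=
  match h : PySem.List.index? line "#" with
  | some i =>
      ((PySem.List.count (PySem.List.slice line none (some (i : Int))) "O" : Int))
        :: count_round_rocks_at_alt (PySem.List.slice line (some ((i : Int) + 1)) none)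
  | none => [((PySem.List.count line "O" : Int))]
termination_by line.length
decreasing_by
  have hdrop : PySem.List.slice line (some ((i : Int) + 1)) none = line.drop (i + 1) := by
    have := PySem.List.slice_from_natCast line (i + 1)
    simpa [Int.natCast_add] using this
  have hne : line ≠ [] := by
    intro hnil; rw [hnil] at h
    simp [PySem.List.index?] at h
  simp only [hdrop, List.length_drop]
  have : 0 < line.length := List.length_pos_iff.mpr hne
  omega

-- ===== PRECONDITION & SPEC =====
def Spec_count_round_rocks_at (line : List String) (out : List Int) : Prop := out = count_round_rocks_at_alt line
instance (line : List String) (out : List Int) : Decidable (Spec_count_round_rocks_at line out) := by unfold Spec_count_round_rocks_at; infer_instance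

-- ===== CLAIM (what is proved, stated in full; the proofs are below) =====
def Claim_equal_count_round_rocks_at : Prop := ∀ (line : List String), Dom_count_round_rocks_at line → Spec_count_round_rocks_at line (count_round_rocks_at line)

-- ===== LEMMAS AND PROOFS =====

-- add c to the first entry (of a nonempty list)
def addFirst (c : Int) : List Int → List Int
  | [] => [c]
  | x :: xs => (c + x) :: xs

theorem addFirst_zero (l : List Int) (hl : l ≠ []) : addFirst 0 l = l := by
  cases l with
  | nil => exact absurd rfl hl
  | cons x xs => simp [addFirst]

theorem addFirst_addFirst (a b : Int) (l : List Int) :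
    addFirst a (addFirst b l) = addFirst (a + b) l := by
  cases l with
  | nil => simp [addFirst]
  | cons x xs => simp [addFirst]; ring

theorem alt_eq_none (line : List String)
    (h : PySem.List.index? line ("#" : String) = none) :
    count_round_rocks_at_alt line = [((PySem.List.count line "O" : Int))] := by
  rw [count_round_rocks_at_alt]
  split
  · rename_i i hi; rw [h] at hi; exact absurd hi (by simp)
  · rfl

theorem alt_eq_some (line : List String) (j : Nat)
    (h : PySem.List.index? line ("#" : String) = some j) :
    count_round_rocks_at_alt line
      = ((PySem.List.count (PySem.List.slice line none (some (j : Int))) "O" : Int))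
        :: count_round_rocks_at_alt (PySem.List.slice line (some ((j : Int) + 1)) none) := by
  rw [count_round_rocks_at_alt]
  split
  · rename_i i hi; rw [h] at hi; injection hi with hi; subst hi; rfl
  · rename_i hi; rw [h] at hi; exact absurd hi (by simp)

theorem alt_ne_nil (line : List String) : count_round_rocks_at_alt line ≠ [] := by
  cases h : PySem.List.index? line ("#" : String) with
  | none => rw [alt_eq_none line h]; simp
  | some j => rw [alt_eq_some line j h]; simp

theorem alt_nil : count_round_rocks_at_alt [] = [0] := by
  rw [alt_eq_none [] (by simp [PySem.List.index?])]
  simp [PySem.List.count]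

theorem alt_hash (rest : List String) :
    count_round_rocks_at_alt ("#" :: rest) = 0 :: count_round_rocks_at_alt rest := by
  rw [alt_eq_some ("#" :: rest) 0 (PySem.List.index?_cons_self _ _)]
  have h1 : PySem.List.slice ("#" :: rest) none (some ((0 : Nat) : Int)) = ([] : List String) := by
    rw [PySem.List.slice_to_natCast]; simp
  have h2 : PySem.List.slice ("#" :: rest) (some (((0 : Nat) : Int) + 1)) none = rest := by
    have := PySem.List.slice_from_natCast ("#" :: rest) 1
    push_cast at this ⊢
    rw [this]; simp
  push_cast at h1 h2 ⊢
  rw [h1, h2]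
  simp [PySem.List.count]

theorem alt_cons (e : String) (rest : List String) (he : e ≠ "#") :
    count_round_rocks_at_alt (e :: rest)
      = addFirst (if e = "O" then 1 else 0) (count_round_rocks_at_alt rest) := by
  have hidx := PySem.List.index?_cons_of_ne (x := e) (v := ("#" : String)) rest he
  cases hj : PySem.List.index? rest ("#" : String) with
  | none =>
    have hE : PySem.List.index? (e :: rest) ("#" : String) = none := by
      rw [hidx, hj]; rfl
    rw [alt_eq_none _ hE, alt_eq_none _ hj]
    by_cases heO : e = "O"
    · simp [heO, PySem.List.count, addFirst]
      ring
    · simp [PySem.List.count, addFirst, heO]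
  | some j =>
    have hE : PySem.List.index? (e :: rest) ("#" : String) = some (j + 1) := by
      rw [hidx, hj]; rfl
    rw [alt_eq_some _ _ hE, alt_eq_some _ _ hj]
    have h1 : PySem.List.slice (e :: rest) none (some ((j + 1 : Nat) : Int))
        = e :: PySem.List.slice rest none (some ((j : Nat) : Int)) := by
      rw [PySem.List.slice_to_natCast, PySem.List.slice_to_natCast]
      simp [List.take_succ_cons]
    have h2 : PySem.List.slice (e :: rest) (some (((j + 1 : Nat) : Int) + 1)) none
        = PySem.List.slice rest (some (((j : Nat) : Int) + 1)) none := by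
      have e1 := PySem.List.slice_from_natCast (e :: rest) (j + 1 + 1)
      have e2 := PySem.List.slice_from_natCast rest (j + 1)
      push_cast at e1 e2 ⊢
      rw [e1, e2]
      simp [List.drop_succ_cons]
    push_cast at h1 h2 ⊢
    rw [h1, h2]
    by_cases heO : e = "O"
    · simp [heO, PySem.List.count, addFirst]
      ring
    · simp [PySem.List.count, addFirst, heO]

-- Invariant: A's fold state (acc, c) yields acc ++ addFirst c (B line).
theorem crr_inv (line : List String) (acc : List Int) (c : Int) :
    ((line.foldl (fun (st : List Int × Int) elem =>
        if elem = "#" then (st.1 ++ [st.2], 0)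
        else if elem = "O" then (st.1, st.2 + 1)
        else st) (acc, c)).1
      ++ [(line.foldl (fun (st : List Int × Int) elem =>
        if elem = "#" then (st.1 ++ [st.2], 0)
        else if elem = "O" then (st.1, st.2 + 1)
        else st) (acc, c)).2])
    = acc ++ addFirst c (count_round_rocks_at_alt line) := by
  induction line generalizing acc c with
  | nil => simp [alt_nil, addFirst]
  | cons e rest ih =>
    rw [List.foldl_cons]
    by_cases h1 : e = "#"
    · simp only [if_pos h1]
      rw [ih (acc ++ [c]) 0, h1, alt_hash, addFirst_zero _ (alt_ne_nil rest)]
      simp [addFirst]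
    · by_cases h2 : e = "O"
      · simp only [if_neg h1, if_pos h2]
        rw [ih acc (c + 1), alt_cons e rest h1, if_pos h2, addFirst_addFirst]
      · simp only [if_neg h1, if_neg h2]
        rw [ih acc c, alt_cons e rest h1, if_neg h2, addFirst_addFirst]
        simp

-- ===== VERDICT (by name: the statement is the Claim_ definition above) =====
theorem count_round_rocks_at_spec : Claim_equal_count_round_rocks_at := by
  intro line _
  unfold Spec_count_round_rocks_at count_round_rocks_at
  have h := crr_inv line [] 0
  simpa [addFirst_zero _ (alt_ne_nil line)] using h
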